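-- pv_equiv track=rewrite | github.com/jesterr0/NfoForge | src/packages/crop_detect.py | _get_largest_common_crop_params
-- ===== SOURCE A (Python) =====
-- from collections import Counter
--
-- def _get_largest_common_crop_params(crop_params_list: list) -> str | None:
--     # count the occurrences of each crop parameter set
--     counter = Counter(crop_params_list)
--
--     # get the most common crops (sorted by frequency)
--     most_common_crops = counter.most_common()
--
--     # track the largest common crop
--     largest_common_crop = None
--
--     for crop, freq in most_common_crops:
--         # if no largest crop has been selected yet or if the current crop is larger
--         if largest_common_crop is None:
--             largest_common_crop = crop
--         else:
--             # compare the sizes of the crops (width and height) and choose the largest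
--             current_x1, current_x2, current_y1, current_y2 = map(
--                 int, largest_common_crop
--             )
--             new_x1, new_x2, new_y1, new_y2 = map(int, crop)
--
--             # if the current crop has a larger size, replace the largest_common_crop
--             if (new_x2 - new_x1) * (new_y2 - new_y1) > (current_x2 - current_x1) * (
--                 current_y2 - current_y1
--             ):
--                 largest_common_crop = crop
--
--     return largest_common_crop
-- ===== SOURCE B (Python) =====
-- from collections import Counter
--
--
-- def _get_largest_common_crop_params(crop_params_list: list) -> str | None:
--     # One pass over the distinct crops (in first-occurrence order): the lexicographic
--     # key (area, frequency) picks the largest-area crop, ties broken by frequency and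
--     # then by first occurrence -- no most_common() sort needed.
--     counter = Counter(crop_params_list)
--     if len(counter) <= 1:
--         # nothing to compare
--         return next(iter(counter), None)
--     best = None
--     best_key = None
--     for crop, freq in counter.items():
--         x1, x2, y1, y2 = map(int, crop)
--         key = ((x2 - x1) * (y2 - y1), freq)
--         if best_key is None or key > best_key:
--             best, best_key = crop, key
--     return best
-- ===== Notes on version B (the rewrite author's own statement) =====
-- stated objective: simpler
-- what changed: B drops Counter.most_common()'s frequency sort and instead makes a single pass over the counter items in insertion order keeping the maximum of the lexicographic key (area, frequency), which reproduces A's largest-area winner with frequency/first-occurrence tie-breaking (with at most one distinct crop it returns it directly, as there is nothing to compare).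
import Mathlib
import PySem

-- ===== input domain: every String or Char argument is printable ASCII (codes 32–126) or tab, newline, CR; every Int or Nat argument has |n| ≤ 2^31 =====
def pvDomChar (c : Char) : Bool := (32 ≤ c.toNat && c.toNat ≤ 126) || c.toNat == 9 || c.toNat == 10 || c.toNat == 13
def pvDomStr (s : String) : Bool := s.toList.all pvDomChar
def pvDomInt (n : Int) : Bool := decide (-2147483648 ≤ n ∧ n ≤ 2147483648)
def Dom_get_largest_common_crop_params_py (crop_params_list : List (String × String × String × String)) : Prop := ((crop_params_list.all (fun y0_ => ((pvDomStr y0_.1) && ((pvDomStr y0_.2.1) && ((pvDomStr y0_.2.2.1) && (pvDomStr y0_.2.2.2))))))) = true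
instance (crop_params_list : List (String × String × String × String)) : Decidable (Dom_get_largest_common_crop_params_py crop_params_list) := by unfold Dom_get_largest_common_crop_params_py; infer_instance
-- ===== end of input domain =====

-- B replaces the most_common() frequency sort by a single max-pass over the counter
-- items with the lexicographic key (area, frequency); same return value, no sort.

-- ===== PORT A =====
-- int(s); Pre_ guarantees every crop string parses, so the .getD 0 default is never used
def pvInt (s : String) : Int := (PySem.Int.ofStr? s).getD 0

-- (x2 - x1) * (y2 - y1) for a crop tuple (x1, x2, y1, y2)
def pvArea (c : String × String × String × String) : Int :=
  (pvInt c.2.1 - pvInt c.1) * (pvInt c.2.2.2 - pvInt c.2.2.1)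

def get_largest_common_crop_params_py (crop_params_list : List (String × String × String × String)) : Option (String × String × String × String) :=
  let counter := PySem.Dict.counter crop_params_list
  -- counter.most_common() = sorted(counter.items(), key=itemgetter(1), reverse=True)
  let most_common_crops := PySem.List.sorted counter.items (fun kv => kv.2) true
  most_common_crops.foldl
    (fun largest_common_crop kv =>
      match largest_common_crop with
      | none => some kv.1
      | some cur => if pvArea cur < pvArea kv.1 then some kv.1 else some cur)
    none

-- ===== PORT B =====
def get_largest_common_crop_params_py_alt (crop_params_list : List (String × String × String × String)) : Option (String × String × String × String) :=
  let counter := PySem.Dict.counter crop_params_list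
  if counter.items.length ≤ 1 then
    -- nothing to compare: next(iter(counter), None)
    counter.items.head?.map (fun kv => kv.1)
  else
    (counter.items.foldl
      (fun acc kv =>
        let key := (pvArea kv.1, kv.2)
        match acc.2 with
        | none => (some kv.1, some key)
        | some bk =>
          if bk.1 < key.1 ∨ (bk.1 = key.1 ∧ bk.2 < key.2) then (some kv.1, some key) else acc)
      (none, none)).1

-- ===== PRECONDITION & SPEC =====
-- Pre_ excludes exactly the inputs on which A raises ValueError: lists with at least
-- two distinct crops in which some crop string is not a Python int literal (A parses
-- every distinct crop there; with at most one distinct crop it never calls int()).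
def Pre_get_largest_common_crop_params_py (crop_params_list : List (String × String × String × String)) : Prop :=
  (PySem.Set.ofList crop_params_list).length ≤ 1 ∨
  (crop_params_list.all (fun c =>
    (PySem.Int.ofStr? c.1).isSome && (PySem.Int.ofStr? c.2.1).isSome &&
    (PySem.Int.ofStr? c.2.2.1).isSome && (PySem.Int.ofStr? c.2.2.2).isSome)) = true
instance (crop_params_list : List (String × String × String × String)) : Decidable (Pre_get_largest_common_crop_params_py crop_params_list) := by unfold Pre_get_largest_common_crop_params_py; infer_instance

def pvWitness_get_largest_common_crop_params_py : (List (String × String × String × String)) :=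
  [("0", "10", "0", "10"), ("0", "4", "0", "4"), ("0", "10", "0", "10")]

def Spec_get_largest_common_crop_params_py (crop_params_list : List (String × String × String × String)) (out : Option (String × String × String × String)) : Prop := out = get_largest_common_crop_params_py_alt crop_params_list
instance (crop_params_list : List (String × String × String × String)) (out : Option (String × String × String × String)) : Decidable (Spec_get_largest_common_crop_params_py crop_params_list out) := by unfold Spec_get_largest_common_crop_params_py; infer_instance

-- ===== CLAIM (what is proved, stated in full; the proofs are below) =====
def Claim_equal_get_largest_common_crop_params_py : Prop := ∀ (crop_params_list : List (String × String × String × String)), Dom_get_largest_common_crop_params_py crop_params_list → Pre_get_largest_common_crop_params_py crop_params_list → Spec_get_largest_common_crop_params_py crop_params_list (get_largest_common_crop_params_py crop_params_list)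

-- ===== LEMMAS AND PROOFS =====

-- keys used by the two scans: A maximises area, B maximises (area, freq) lexicographically
def pvKA (kv : (String × String × String × String) × Int) : Int := pvArea kv.1
def pvKB (kv : (String × String × String × String) × Int) : Lex (Int × Int) := toLex (pvArea kv.1, kv.2)

-- the common core of both loops: keep the current element unless the new one is strictly better
def pvPick {α K : Type} [LinearOrder K] (k : α → K) (c : α) (l : List α) : α :=
  l.foldl (fun c x => if k c < k x then x else c) c

lemma pvPick_le {α K : Type} [LinearOrder K] (k : α → K) (l : List α) :
    ∀ c : α, ∀ y ∈ c :: l, k y ≤ k (pvPick k c l) := by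
  induction l with
  | nil => intro c y hy; simp at hy; subst hy; simp [pvPick]
  | cons x l ih =>
    intro c y hy
    have hstep : pvPick k c (x :: l) = pvPick k (if k c < k x then x else c) l := rfl
    rw [hstep]
    have hc : k c ≤ k (if k c < k x then x else c) := by split <;> [exact le_of_lt ‹_›; exact le_rfl]
    have hx : k x ≤ k (if k c < k x then x else c) := by split <;> [exact le_rfl; exact le_of_not_gt ‹_›]
    have hhead : k (if k c < k x then x else c) ≤ k (pvPick k (if k c < k x then x else c) l) :=
      ih _ _ (List.mem_cons_self)
    rcases List.mem_cons.mp hy with rfl | hy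
    · exact le_trans hc hhead
    · rcases List.mem_cons.mp hy with rfl | hy
      · exact le_trans hx hhead
      · exact ih _ _ (List.mem_cons_of_mem _ hy)

lemma pvPick_eq_self {α K : Type} [LinearOrder K] (k : α → K) (l : List α) :
    ∀ c : α, (∀ y ∈ l, k y ≤ k c) → pvPick k c l = c := by
  induction l with
  | nil => intro c _; rfl
  | cons x l ih =>
    intro c h
    have hx : ¬ k c < k x := not_lt.mpr (h x (List.mem_cons_self))
    have hstep : pvPick k c (x :: l) = pvPick k (if k c < k x then x else c) l := rfl
    rw [hstep, if_neg hx]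
    exact ih c (fun y hy => h y (List.mem_cons_of_mem _ hy))

lemma pvPick_find? {α K : Type} [LinearOrder K] (k : α → K) (l : List α) :
    ∀ c : α, (c :: l).find? (fun y => decide (k (pvPick k c l) ≤ k y)) = some (pvPick k c l) := by
  induction l with
  | nil => intro c; simp [pvPick]
  | cons x l ih =>
    intro c
    have hstep : pvPick k c (x :: l) = pvPick k (if k c < k x then x else c) l := rfl
    by_cases hcx : k c < k x
    · rw [hstep, if_pos hcx]
      have hxle : k x ≤ k (pvPick k x l) := pvPick_le k l x x (List.mem_cons_self)
      have hc : ¬ k (pvPick k x l) ≤ k c := not_le.mpr (lt_of_lt_of_le hcx hxle)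
      rw [List.find?_cons_of_neg (by simpa using hc)]
      exact ih x
    · rw [hstep, if_neg hcx]
      by_cases hwc : k (pvPick k c l) ≤ k c
      · have hall : ∀ y ∈ l, k y ≤ k c :=
          fun y hy => le_trans (pvPick_le k l c y (List.mem_cons_of_mem _ hy)) hwc
        have hec : pvPick k c l = c := pvPick_eq_self k l c hall
        rw [hec]
        exact List.find?_cons_of_pos (by simp)
      · have hc : k c < k (pvPick k c l) := lt_of_not_ge hwc
        have hx : ¬ k (pvPick k c l) ≤ k x :=
          not_le.mpr (lt_of_le_of_lt (le_of_not_gt hcx) hc)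
        rw [List.find?_cons_of_neg (by simpa using (not_le.mpr hc)),
            List.find?_cons_of_neg (by simpa using hx)]
        have := ih c
        rwa [List.find?_cons_of_neg (by simpa using (not_le.mpr hc))] at this
  
lemma pvPick_mem {α K : Type} [LinearOrder K] (k : α → K) (l : List α) (c : α) :
    pvPick k c l ∈ c :: l :=
  List.mem_of_find?_eq_some (pvPick_find? k l c)

-- named forms of the two loop bodies (identical to the lambdas in the ports)
def pvStepA (largest_common_crop : Option (String × String × String × String))
    (kv : (String × String × String × String) × Int) : Option (String × String × String × String) :=
  match largest_common_crop with
  | none => some kv.1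
  | some cur => if pvArea cur < pvArea kv.1 then some kv.1 else some cur

def pvStepB (acc : Option (String × String × String × String) × Option (Int × Int))
    (kv : (String × String × String × String) × Int) :
    Option (String × String × String × String) × Option (Int × Int) :=
  let key := (pvArea kv.1, kv.2)
  match acc.2 with
  | none => (some kv.1, some key)
  | some bk =>
    if bk.1 < key.1 ∨ (bk.1 = key.1 ∧ bk.2 < key.2) then (some kv.1, some key) else acc

-- A's option-valued loop over the tail computes pvPick with the area key
lemma pvFoldA_eq (t : List ((String × String × String × String) × Int)) :
    ∀ p : (String × String × String × String) × Int,
    t.foldl pvStepA (some p.1) = some ((pvPick pvKA p t).1) := by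
  induction t with
  | nil => intro p; rfl
  | cons x t ih =>
    intro p
    have hstep : pvPick pvKA p (x :: t) = pvPick pvKA (if pvKA p < pvKA x then x else p) t := rfl
    rw [hstep]
    simp only [List.foldl_cons]
    by_cases h : pvKA p < pvKA x
    · have hred : pvStepA (some p.1) x = some x.1 := by
        simp only [pvKA] at h
        simp [pvStepA, h]
      rw [hred, if_pos h]
      exact ih x
    · have hred : pvStepA (some p.1) x = some p.1 := by
        simp only [pvKA] at h
        simp [pvStepA, h]
      rw [hred, if_neg h]
      exact ih p

-- B's loop over the tail computes pvPick with the lexicographic (area, freq) key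
lemma pvFoldB_eq (t : List ((String × String × String × String) × Int)) :
    ∀ p : (String × String × String × String) × Int,
    t.foldl pvStepB (some p.1, some (pvArea p.1, p.2))
    = (some ((pvPick pvKB p t).1), some (pvArea (pvPick pvKB p t).1, (pvPick pvKB p t).2)) := by
  induction t with
  | nil => intro p; rfl
  | cons x t ih =>
    intro p
    have hstep : pvPick pvKB p (x :: t) = pvPick pvKB (if pvKB p < pvKB x then x else p) t := rfl
    rw [hstep]
    simp only [List.foldl_cons]
    have hiff : (pvArea p.1 < pvArea x.1 ∨ (pvArea p.1 = pvArea x.1 ∧ p.2 < x.2)) ↔ pvKB p < pvKB x := by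
      simp [pvKB, Prod.Lex.lt_iff]
    by_cases h : pvKB p < pvKB x
    · have hred : pvStepB (some p.1, some (pvArea p.1, p.2)) x = (some x.1, some (pvArea x.1, x.2)) := by
        simp only [pvStepB]
        rw [if_pos (hiff.mpr h)]
      rw [hred, if_pos h]
      exact ih x
    · have hred : pvStepB (some p.1, some (pvArea p.1, p.2)) x = (some p.1, some (pvArea p.1, p.2)) := by
        simp only [pvStepB]
        rw [if_neg (fun hc => h (hiff.mp hc))]
      rw [hred, if_neg h]
      exact ih p

-- insertBy unfolding equations
lemma pvInsertBy_nil {α : Type} (bef : α → α → Bool) (x : α) :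
    PySem.List.insertBy bef x [] = [x] := rfl
lemma pvInsertBy_cons {α : Type} (bef : α → α → Bool) (x y : α) (ys : List α) :
    PySem.List.insertBy bef x (y :: ys) = if bef x y then x :: y :: ys else y :: PySem.List.insertBy bef x ys := rfl

lemma pvFilter_insertBy_of_neg {α : Type} (bef : α → α → Bool) (P : α → Bool) (x : α)
    (hx : P x = false) : ∀ l : List α, (PySem.List.insertBy bef x l).filter P = l.filter P := by
  intro l
  induction l with
  | nil => simp [pvInsertBy_nil, hx]
  | cons y l ih =>
    rw [pvInsertBy_cons]
    split
    · simp [hx]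
    · cases hy : P y <;> simp [hy, ih]

lemma pvFilter_insertBy_of_pos (x : (String × String × String × String) × Int) (φ : Int)
    (hx : x.2 = φ) :
    ∀ l : List ((String × String × String × String) × Int),
    l.Pairwise (fun a b => b.2 ≤ a.2) →
    (PySem.List.insertBy (fun a b => decide (b.2 < a.2)) x l).filter (fun y => decide (y.2 = φ))
      = l.filter (fun y => decide (y.2 = φ)) ++ [x] := by
  intro l
  induction l with
  | nil => intro _; simp [pvInsertBy_nil, hx]
  | cons y l ih =>
    intro hp
    have hy' : ∀ z ∈ l, z.2 ≤ y.2 := (List.pairwise_cons.mp hp).1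
    have hp' : l.Pairwise (fun a b => b.2 ≤ a.2) := (List.pairwise_cons.mp hp).2
    rw [pvInsertBy_cons]
    split
    · -- y.2 < x.2 : every element of y :: l has key < φ, so its filter is empty
      rename_i hlt
      have hlt' : y.2 < x.2 := of_decide_eq_true hlt
      have hnil : (y :: l).filter (fun y => decide (y.2 = φ)) = [] := by
        rw [List.filter_eq_nil_iff]
        intro z hz
        simp only [decide_eq_true_eq]
        rcases List.mem_cons.mp hz with rfl | hz
        · omega
        · have := hy' z hz; omega
      rw [List.filter_cons_of_pos (p := fun z : (String × String × String × String) × Int => decide (z.2 = φ)) (by simp [hx]), hnil]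
      simp
    · cases hyφ : decide (y.2 = φ) with
      | true =>
        rw [List.filter_cons_of_pos (p := fun z : (String × String × String × String) × Int => decide (z.2 = φ)) hyφ,
            List.filter_cons_of_pos (p := fun z : (String × String × String × String) × Int => decide (z.2 = φ)) hyφ, ih hp']
        rfl
      | false => rw [List.filter_cons_of_neg (p := fun z : (String × String × String × String) × Int => decide (z.2 = φ)) (by simp [hyφ]),
            List.filter_cons_of_neg (p := fun z : (String × String × String × String) × Int => decide (z.2 = φ)) (by simp [hyφ]), ih hp']

-- stability of the reverse frequency sort: equal-frequency elements keep their order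
lemma pvSorted_filter_stable (φ : Int) :
    ∀ L : List ((String × String × String × String) × Int),
    (PySem.List.sorted L (fun kv => kv.2) true).filter (fun y => decide (y.2 = φ))
      = L.filter (fun y => decide (y.2 = φ)) := by
  intro L
  induction L using List.reverseRecOn with
  | nil => rw [PySem.List.sorted_rev_eq_foldl_insertBy]; rfl
  | append_singleton L x ih =>
    have hins : PySem.List.sorted (L ++ [x]) (fun kv => kv.2) true
        = PySem.List.insertBy (fun a b => decide (b.2 < a.2)) x (PySem.List.sorted L (fun kv => kv.2) true) := by
      rw [PySem.List.sorted_rev_eq_foldl_insertBy, PySem.List.sorted_rev_eq_foldl_insertBy, List.foldl_append]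
      rfl
    rw [hins]
    cases hPx : decide (x.2 = φ) with
    | false =>
      rw [pvFilter_insertBy_of_neg _ (fun y => decide (y.2 = φ)) x hPx, ih, List.filter_append]
      simp [hPx]
    | true =>
      rw [pvFilter_insertBy_of_pos x φ (of_decide_eq_true hPx) _
            (PySem.List.sorted_pairwise_rev L (fun kv => kv.2)), ih, List.filter_append]
      simp [hPx]

-- in a Nodup list, "a strictly before b" and "b strictly before a" contradict
lemma pvBefore_asymm {α : Type} [DecidableEq α] {l : List α} (hnd : l.Nodup) {a b : α}
    {p1 s1 p2 s2 : List α} (h1 : l = p1 ++ a :: s1) (hb : b ∈ s1)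
    (h2 : l = p2 ++ b :: s2) (ha : a ∈ s2) : False := by
  have key : ∀ (p s : List α) (u v : α), l = p ++ u :: s → v ∈ s → l.idxOf u < l.idxOf v := by
    intro p s u v h hv
    have hnd' := hnd
    rw [h] at hnd'
    have hndm := List.nodup_append.mp hnd'
    have hup : u ∉ p := fun hup => hndm.2.2 u hup u (List.mem_cons_self) rfl
    have hvp : v ∉ p := fun hvp => hndm.2.2 v hvp v (List.mem_cons_of_mem _ hv) rfl
    have hvu : v ≠ u := by
      intro h'; subst h'
      exact (List.nodup_cons.mp hndm.2.1).1 hv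
    rw [h, List.idxOf_append, List.idxOf_append, if_neg (by simpa using hup), if_neg (by simpa using hvp)]
    have h1' : List.idxOf u (u :: s) = 0 := by simp
    have h2' : 0 < List.idxOf v (u :: s) := by
      have huv : (u == v) = false := beq_eq_false_iff_ne.mpr (fun h => hvu h.symm)
      simp [List.idxOf_cons, huv]
    omega
  have k1 := key p1 s1 a b h1 hb
  have k2 := key p2 s2 b a h2 ha
  omega

-- the two scans agree: first max-area element of the frequency-sorted items
-- = first lexicographic (area, freq) maximum of the items in insertion order
lemma pvPick_transfer (L : List ((String × String × String × String) × Int)) (hnd : L.Nodup)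
    (m m' : (String × String × String × String) × Int)
    (t t' : List ((String × String × String × String) × Int))
    (hs : PySem.List.sorted L (fun kv => kv.2) true = m :: t) (hL : L = m' :: t') :
    pvPick pvKA m t = pvPick pvKB m' t' := by
  set wA := pvPick pvKA m t with hwA
  set wB := pvPick pvKB m' t' with hwB
  have hperm : (PySem.List.sorted L (fun kv => kv.2) true).Perm L := PySem.List.sorted_perm L _ true
  have hmemS : ∀ y, y ∈ L ↔ y ∈ m :: t := by
    intro y; rw [← hs]; exact (hperm.mem_iff).symm
  have hmemA : wA ∈ L := (hmemS wA).mpr (pvPick_mem pvKA t m)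
  have hmemB : wB ∈ L := hL ▸ pvPick_mem pvKB t' m'
  have hAmax : ∀ y ∈ L, pvKA y ≤ pvKA wA := fun y hy => pvPick_le pvKA t m y ((hmemS y).mp hy)
  have hBmax : ∀ y ∈ L, pvKB y ≤ pvKB wB := fun y hy => pvPick_le pvKB t' m' y (hL ▸ hy)
  have hAB : pvArea wA.1 ≤ pvArea wB.1 := by
    have := hBmax wA hmemA
    rw [pvKB, pvKB, Prod.Lex.le_iff] at this
    simp at this
    rcases this with h | h
    · exact le_of_lt h
    · exact le_of_eq h.1
  have hBA : pvArea wB.1 ≤ pvArea wA.1 := hAmax wB hmemB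
  have hareaEq : pvArea wA.1 = pvArea wB.1 := le_antisymm hAB hBA
  by_contra hne
  -- decompose the sorted list at the first area-maximum wA
  have hfA := pvPick_find? pvKA t m
  rw [List.find?_eq_some_iff_append] at hfA
  obtain ⟨-, u, v, hsplitS, hu⟩ := hfA
  try simp only [← hwA] at hsplitS hu
  -- decompose the item list at the first lexicographic maximum wB
  have hfB := pvPick_find? pvKB t' m'
  rw [List.find?_eq_some_iff_append] at hfB
  obtain ⟨-, u', v', hsplitL, hu'⟩ := hfB
  try simp only [← hwB] at hsplitL hu'
  have hsplitS' : PySem.List.sorted L (fun kv => kv.2) true = u ++ wA :: v := by rw [hs, hsplitS]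
  have hsplitL' : L = u' ++ wB :: v' := by rw [hL, hsplitL]
  -- wB comes strictly after wA in the sorted list
  have hwBv : wB ∈ v := by
    have : wB ∈ u ++ wA :: v := by rw [← hsplitS]; exact (hmemS wB).mp hmemB
    rcases List.mem_append.mp this with h | h
    · exfalso
      have harea' : pvKA wA = pvKA wB := hareaEq
      have := hu wB h
      simp only [Bool.not_eq_eq_eq_not, Bool.not_true, decide_eq_false_iff_not, not_le] at this
      exact absurd this (not_lt.mpr (le_of_eq harea'))
    · rcases List.mem_cons.mp h with h | h
      · exact absurd h.symm hne
      · exact h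
  -- hence freq wB ≤ freq wA by sortedness
  have hpair : (u ++ wA :: v).Pairwise (fun a b => b.2 ≤ a.2) := by
    rw [← hsplitS']; exact PySem.List.sorted_pairwise_rev L _
  have hfreq1 : wB.2 ≤ wA.2 :=
    (List.pairwise_cons.mp ((List.pairwise_append.mp hpair).2.1)).1 wB hwBv
  -- wA cannot come strictly before wB in L
  have hwAv' : wA ∈ v' := by
    have : wA ∈ u' ++ wB :: v' := by rw [← hsplitL']; exact hmemA
    rcases List.mem_append.mp this with h | h
    · exfalso
      have := hu' wA h
      simp only [Bool.not_eq_eq_eq_not, Bool.not_true, decide_eq_false_iff_not, not_le] at this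
      rw [pvKB, pvKB, Prod.Lex.lt_iff] at this
      simp at this
      rcases this with h' | h'
      · omega
      · omega
    · rcases List.mem_cons.mp h with h | h
      · exact absurd h hne
      · exact h
  -- equal frequencies
  have hfreq2 : wA.2 ≤ wB.2 := by
    have := hBmax wA hmemA
    rw [pvKB, pvKB, Prod.Lex.le_iff] at this
    simp at this
    rcases this with h | h
    · omega
    · exact h.2
  have hφ : wA.2 = wB.2 := le_antisymm hfreq2 hfreq1
  -- stability: restrict both lists to frequency wA.2 and compare positions
  have hstab := pvSorted_filter_stable wA.2 L
  have hPA : (decide (wA.2 = wA.2)) = true := by simp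
  have hPB : (decide (wB.2 = wA.2)) = true := by simp [hφ]
  have hFs : L.filter (fun y => decide (y.2 = wA.2))
      = (u.filter (fun y => decide (y.2 = wA.2))) ++ wA :: (v.filter (fun y => decide (y.2 = wA.2))) := by
    rw [← hstab, hsplitS', List.filter_append, List.filter_cons_of_pos (p := fun z : (String × String × String × String) × Int => decide (z.2 = wA.2)) hPA]
  have hFL : L.filter (fun y => decide (y.2 = wA.2))
      = (u'.filter (fun y => decide (y.2 = wA.2))) ++ wB :: (v'.filter (fun y => decide (y.2 = wA.2))) := by
    rw [hsplitL', List.filter_append, List.filter_cons_of_pos (p := fun z : (String × String × String × String) × Int => decide (z.2 = wA.2)) hPB]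
  have hndF : (L.filter (fun y => decide (y.2 = wA.2))).Nodup := hnd.filter _
  exact pvBefore_asymm hndF hFs (List.mem_filter.mpr ⟨hwBv, hPB⟩)
    hFL (List.mem_filter.mpr ⟨hwAv', hPA⟩)

-- the items of a counter form a Nodup list (distinct keys)
lemma pvItems_nodup (xs : List (String × String × String × String)) :
    (PySem.Dict.counter xs).items.Nodup := by
  rw [PySem.Dict.items_counter]
  exact (PySem.Set.nodup_ofList xs).map (fun a b h => congrArg Prod.fst h)

-- ===== VERDICT (by name: the statement is the Claim_ definition above) =====
theorem get_largest_common_crop_params_py_spec : Claim_equal_get_largest_common_crop_params_py := by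
  intro xs _hdom _hpre
  unfold Spec_get_largest_common_crop_params_py
  show (PySem.List.sorted (PySem.Dict.counter xs).items (fun kv => kv.2) true).foldl pvStepA none
      = (if (PySem.Dict.counter xs).items.length ≤ 1
         then (PySem.Dict.counter xs).items.head?.map (fun kv => kv.1)
         else ((PySem.Dict.counter xs).items.foldl pvStepB (none, none)).1)
  cases hL : (PySem.Dict.counter xs).items with
  | nil => rfl
  | cons m' t' =>
    cases t' with
    | nil => rfl
    | cons x u =>
      have hlen : ¬ (m' :: x :: u : List _).length ≤ 1 := by simp
      rw [if_neg hlen]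
      cases hs : PySem.List.sorted (m' :: x :: u) (fun kv => kv.2) true with
      | nil => exact absurd ((PySem.List.sorted_eq_nil_iff _ _ _).mp hs) (by simp)
      | cons m t =>
        rw [List.foldl_cons, List.foldl_cons]
        show t.foldl pvStepA (some m.1)
            = ((x :: u).foldl pvStepB (some m'.1, some (pvArea m'.1, m'.2))).1
        rw [pvFoldA_eq t m, pvFoldB_eq (x :: u) m',
            pvPick_transfer (m' :: x :: u) (hL ▸ pvItems_nodup xs) m m' t (x :: u) hs rfl]
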